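-- pv_equiv track=rewrite | github.com/Andingfangt/cs170 | 2023DiscussionAndHw/HW2/count_multiples_of_3.py | count_number_help
-- ===== SOURCE A (Python) =====
-- def count_number_help(A):
--
--     odd = [0, 0, 0]
--     even = [0, 0, 0]
--     n = len(A)
--
--     # base case
--     if n == 1:
--         odd[A[0] % 3] += 1 # A itself.
--         even[0] = 1 # A has a subset [].
--         return odd, even
--
--     # split into left and right part.
--     odd_l, even_l = count_number_help(A[:n//2])
--     odd_r, even_r = count_number_help(A[n//2:])
--
--     # merge those table, whose runtime is 36*O(nlogn):
--     # ∵ If a set has n elements, then the number of subset is 2^n,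
--     # ∴ the number is both table will no more than 2^n => n bits in binary
--     # ∴ multiple two n bits number will cost O(nlogn)
--     for i in range(3):
--         for j in range(3):
--             # odd = odd + even; even = even + even or odd + odd;
--             # and their mod 3 value add mod 3 = 0.
--             odd[i] += odd_l[j] * even_r[(i - j) % 3]
--             odd[i] += even_l[j] * odd_r[(i - j) % 3]
--             even[i] += even_l[j] * even_r[(i - j) % 3]
--             even[i] += odd_l[j] * odd_r[(i - j) % 3]
--
--     return odd, even
-- ===== SOURCE B (Python) =====
-- def count_number_help(A):
--     # Single linear pass: fold each element into the running odd/even sum-mod-3 tables.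
--     odd = [0, 0, 0]
--     even = [1, 0, 0]  # the empty subset
--     for x in A:
--         r = x % 3
--         odd, even = (
--             [odd[i] + even[(i - r) % 3] for i in range(3)],
--             [even[i] + odd[(i - r) % 3] for i in range(3)],
--         )
--     return odd, even
-- ===== Notes on version B (the rewrite author's own statement) =====
-- stated objective: alternative
-- what changed: replaced the divide-and-conquer recursion with 3x3 convolution merges by a single left-to-right pass folding each element into the running odd/even sum-mod-3 tables (fewer passes, but the growing big-integer counts make the fold no faster at large n)
-- crash fix: on the empty list A recurses forever and raises RecursionError, while B returns ([0,0,0],[1,0,0]) (no nonempty subset, one empty subset) — e.g. on count_number_help([]): A raises RecursionError, B returns ([0, 0, 0], [1, 0, 0])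
import Mathlib
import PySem

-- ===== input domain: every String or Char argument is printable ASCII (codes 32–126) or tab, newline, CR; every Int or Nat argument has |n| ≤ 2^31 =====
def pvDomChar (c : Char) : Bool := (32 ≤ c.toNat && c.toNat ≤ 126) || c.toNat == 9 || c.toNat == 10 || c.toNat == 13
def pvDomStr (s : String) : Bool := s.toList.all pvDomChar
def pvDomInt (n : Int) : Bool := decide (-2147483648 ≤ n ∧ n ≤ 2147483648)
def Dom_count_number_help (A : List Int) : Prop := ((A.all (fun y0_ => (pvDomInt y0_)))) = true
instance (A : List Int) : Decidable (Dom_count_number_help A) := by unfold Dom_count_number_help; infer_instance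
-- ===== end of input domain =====

-- B replaces A's divide-and-conquer (recursive halving + 3×3 convolution merge) by one linear
-- left-to-right pass folding each element into the running odd/even sum-mod-3 tables (alternative
-- algorithm of similar cost: the counts grow into big integers either way).

-- ===== PORT A =====
-- the nested 'for i in range(3): for j in range(3):' merge loop of A, transliterated
def mergeA (ol el orr err : List Int) : List Int × List Int :=
  (PySem.List.pyRange 0 3 1).foldl (fun s i =>
    (PySem.List.pyRange 0 3 1).foldl (fun s j =>
      let k := (PySem.Int.mod (i - j) 3).toNat
      let odd := s.1.set i.toNat (s.1.getD i.toNat 0 + ol.getD j.toNat 0 * err.getD k 0)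
      let odd := odd.set i.toNat (odd.getD i.toNat 0 + el.getD j.toNat 0 * orr.getD k 0)
      let even := s.2.set i.toNat (s.2.getD i.toNat 0 + el.getD j.toNat 0 * err.getD k 0)
      let even := even.set i.toNat (even.getD i.toNat 0 + ol.getD j.toNat 0 * orr.getD k 0)
      (odd, even)) s) ([0, 0, 0], [0, 0, 0])

theorem pv_left_lt (A : List Int) (h : 2 ≤ A.length) :
    (PySem.List.slice A none (some (PySem.Int.floordiv (A.length : Int) 2))).length < A.length := by
  have hfd : PySem.Int.floordiv ((A.length : Nat) : Int) ((2 : Nat) : Int) = ((A.length / 2 : Nat) : Int) :=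
    PySem.Int.floordiv_natCast A.length 2
  rw [show ((2 : Nat) : Int) = (2 : Int) by norm_num] at hfd
  rw [hfd, PySem.List.slice_to A (Int.natCast_nonneg _)]
  simp
  omega

theorem pv_right_lt (A : List Int) (h : 2 ≤ A.length) :
    (PySem.List.slice A (some (PySem.Int.floordiv (A.length : Int) 2)) none).length < A.length := by
  have hfd : PySem.Int.floordiv ((A.length : Nat) : Int) ((2 : Nat) : Int) = ((A.length / 2 : Nat) : Int) :=
    PySem.Int.floordiv_natCast A.length 2
  rw [show ((2 : Nat) : Int) = (2 : Int) by norm_num] at hfd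
  rw [hfd, PySem.List.slice_from A (Int.natCast_nonneg _)]
  simp
  omega

def count_number_help (A : List Int) : List Int × List Int :=
  if _h0 : A.length = 0 then ([0, 0, 0], [1, 0, 0])  -- totality guard: Python recurses forever here (outside Pre_)
  else if _h1 : A.length = 1 then
    -- odd[A[0] % 3] += 1; even[0] = 1  (A[0] is in range since n = 1)
    (([0, 0, 0] : List Int).set (PySem.Int.mod (A.headD 0) 3).toNat 1, [1, 0, 0])
  else
    let l := count_number_help (PySem.List.slice A none (some (PySem.Int.floordiv (A.length : Int) 2)))
    let r := count_number_help (PySem.List.slice A (some (PySem.Int.floordiv (A.length : Int) 2)) none)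
    mergeA l.1 l.2 r.1 r.2
termination_by A.length
decreasing_by
  · exact pv_left_lt A (by omega)
  · exact pv_right_lt A (by omega)

-- ===== PORT B =====
def stepB (s : List Int × List Int) (x : Int) : List Int × List Int :=
  let r := PySem.Int.mod x 3
  ((PySem.List.pyRange 0 3 1).map
      (fun i => s.1.getD i.toNat 0 + s.2.getD (PySem.Int.mod (i - r) 3).toNat 0),
   (PySem.List.pyRange 0 3 1).map
      (fun i => s.2.getD i.toNat 0 + s.1.getD (PySem.Int.mod (i - r) 3).toNat 0))

def count_number_help_alt (A : List Int) : List Int × List Int :=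
  A.foldl stepB ([0, 0, 0], [1, 0, 0])

-- ===== PRECONDITION & SPEC =====
-- Pre_ excludes only the empty list, on which A recurses forever (RecursionError).
def Pre_count_number_help (A : List Int) : Prop := A ≠ []
instance (A : List Int) : Decidable (Pre_count_number_help A) := by unfold Pre_count_number_help; infer_instance
def pvWitness_count_number_help : List Int := [1, 2, 3]

-- On the empty list A raises RecursionError while B returns ([0,0,0],[1,0,0]).
def Raises_count_number_help (A : List Int) : Prop := A = []
instance (A : List Int) : Decidable (Raises_count_number_help A) := by unfold Raises_count_number_help; infer_instance
def pvRaiseWitness_count_number_help : List Int := []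
def pvRaiseWitnessOut_count_number_help : List Int × List Int := ([0, 0, 0], [1, 0, 0])

def Spec_count_number_help (A : List Int) (out : List Int × List Int) : Prop := out = count_number_help_alt A
instance (A : List Int) (out : List Int × List Int) : Decidable (Spec_count_number_help A out) := by unfold Spec_count_number_help; infer_instance

-- ===== CLAIM (what is proved, stated in full; the proofs are below) =====
def Claim_equal_count_number_help : Prop := ∀ (A : List Int), Dom_count_number_help A → Pre_count_number_help A → Spec_count_number_help A (count_number_help A)
def Claim_raises_count_number_help : Prop := (∀ (A : List Int), Dom_count_number_help A → Raises_count_number_help A → ¬ Pre_count_number_help A) ∧ (Dom_count_number_help (pvRaiseWitness_count_number_help) ∧ Raises_count_number_help (pvRaiseWitness_count_number_help) ∧ count_number_help_alt (pvRaiseWitness_count_number_help) = pvRaiseWitnessOut_count_number_help)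

-- ===== LEMMAS AND PROOFS =====

theorem pyRange03 : PySem.List.pyRange 0 3 1 = [0, 1, 2] := by decide

theorem stepB_eq (a b c d e f x : Int) :
    stepB ([a, b, c], [d, e, f]) x =
      if PySem.Int.mod x 3 = 0 then ([a + d, b + e, c + f], [d + a, e + b, f + c])
      else if PySem.Int.mod x 3 = 1 then ([a + f, b + d, c + e], [d + c, e + a, f + b])
      else ([a + e, b + f, c + d], [d + b, e + c, f + a]) := by
  have h3 : PySem.Int.mod x 3 = x % 3 := PySem.Int.mod_eq_emod_of_pos (by norm_num)
  have hx : x % 3 = 0 ∨ x % 3 = 1 ∨ x % 3 = 2 := by omega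
  rcases hx with h | h | h <;>
    simp [stepB, pyRange03, h]

theorem mergeA_eq (a b c d e f p q u v w z : Int) :
    mergeA [a, b, c] [d, e, f] [p, q, u] [v, w, z] =
      ([a*v + d*p + (b*z + e*u) + (c*w + f*q),
        a*w + d*q + (b*v + e*p) + (c*z + f*u),
        a*z + d*u + (b*w + e*q) + (c*v + f*p)],
       [d*v + a*p + (e*z + b*u) + (f*w + c*q),
        d*w + a*q + (e*v + b*p) + (f*z + c*u),
        d*z + a*u + (e*w + b*q) + (f*v + c*p)]) := by
  simp [mergeA, pyRange03]
  constructor <;> and_intros <;> ring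

theorem shape_foldB (A : List Int) (a b c d e f : Int) :
    ∃ a' b' c' d' e' f', A.foldl stepB ([a, b, c], [d, e, f]) = ([a', b', c'], [d', e', f']) := by
  induction A generalizing a b c d e f with
  | nil => exact ⟨a, b, c, d, e, f, rfl⟩
  | cons x A ih =>
    rw [List.foldl_cons, stepB_eq]
    split_ifs <;> exact ih _ _ _ _ _ _

theorem merge_e0 (a b c d e f : Int) :
    mergeA [a, b, c] [d, e, f] [0, 0, 0] [1, 0, 0] = ([a, b, c], [d, e, f]) := by
  rw [mergeA_eq]; norm_num

theorem merge_step (a b c d e f p q u v w z x : Int) :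
    mergeA [a, b, c] [d, e, f] (stepB ([p, q, u], [v, w, z]) x).1 (stepB ([p, q, u], [v, w, z]) x).2
      = stepB (mergeA [a, b, c] [d, e, f] [p, q, u] [v, w, z]) x := by
  have h3 : PySem.Int.mod x 3 = x % 3 := PySem.Int.mod_eq_emod_of_pos (by norm_num)
  have hx : x % 3 = 0 ∨ x % 3 = 1 ∨ x % 3 = 2 := by omega
  rcases hx with h | h | h <;>
  · rw [mergeA_eq, stepB_eq, stepB_eq]
    simp only [h3, h]
    norm_num
    rw [mergeA_eq]
    norm_num [Prod.mk.injEq, List.cons.injEq]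
    and_intros <;> ring

theorem merge_fold (R L : List Int) :
    mergeA (count_number_help_alt L).1 (count_number_help_alt L).2
           (count_number_help_alt R).1 (count_number_help_alt R).2
      = count_number_help_alt (L ++ R) := by
  induction R using List.reverseRecOn with
  | nil =>
    obtain ⟨a, b, c, d, e, f, hL⟩ := shape_foldB L 0 0 0 1 0 0
    simp only [count_number_help_alt, List.append_nil, List.foldl_nil]
    rw [hL]
    exact merge_e0 a b c d e f
  | append_singleton R x ih =>
    obtain ⟨a, b, c, d, e, f, hL⟩ := shape_foldB L 0 0 0 1 0 0
    obtain ⟨p, q, u, v, w, z, hR⟩ := shape_foldB R 0 0 0 1 0 0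
    simp only [count_number_help_alt, List.foldl_append, List.foldl_cons, List.foldl_nil] at *
    rw [hL, hR] at *
    rw [merge_step, ih]

theorem base_case (x : Int) :
    (([0, 0, 0] : List Int).set (PySem.Int.mod x 3).toNat 1, ([1, 0, 0] : List Int))
      = count_number_help_alt [x] := by
  simp only [count_number_help_alt, List.foldl_cons, List.foldl_nil]
  rw [stepB_eq]
  have h3 : PySem.Int.mod x 3 = x % 3 := PySem.Int.mod_eq_emod_of_pos (by norm_num)
  have hx : x % 3 = 0 ∨ x % 3 = 1 ∨ x % 3 = 2 := by omega
  rcases hx with h | h | h <;> simp only [h3, h] <;> simp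

theorem main_eq (n : Nat) : ∀ (A : List Int), A.length = n → A ≠ [] →
    count_number_help A = count_number_help_alt A := by
  induction n using Nat.strong_induction_on with
  | _ n ih =>
    intro A hn hne
    rw [count_number_help]
    by_cases h0 : A.length = 0
    · exact absurd (List.length_eq_zero_iff.mp h0) hne
    by_cases h1 : A.length = 1
    · simp only [h1, dif_pos]
      obtain ⟨x, hx⟩ : ∃ x, A = [x] := List.length_eq_one_iff.mp h1
      subst hx
      simpa using base_case x
    · simp only [h0, h1]
      have h2 : 2 ≤ A.length := by omega
      have hfd : PySem.Int.floordiv ((A.length : Nat) : Int) ((2 : Nat) : Int)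
          = ((A.length / 2 : Nat) : Int) := PySem.Int.floordiv_natCast A.length 2
      rw [show ((2 : Nat) : Int) = (2 : Int) by norm_num] at hfd
      rw [hfd, PySem.List.slice_to A (Int.natCast_nonneg _), PySem.List.slice_from A (Int.natCast_nonneg _)]
      simp only [Int.toNat_natCast]
      have hl : (A.take (A.length / 2)).length = A.length / 2 := by simp; omega
      have hr : (A.drop (A.length / 2)).length = A.length - A.length / 2 := by simp
      have hlt : count_number_help (A.take (A.length / 2)) = count_number_help_alt (A.take (A.length / 2)) := by
        apply ih (A.length / 2) (by omega) _ hl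
        intro hE; rw [hE] at hl; simp at hl; omega
      have hrt : count_number_help (A.drop (A.length / 2)) = count_number_help_alt (A.drop (A.length / 2)) := by
        apply ih (A.length - A.length / 2) (by omega) _ hr
        intro hE; rw [hE] at hr; simp at hr; omega
      rw [hlt, hrt, merge_fold, List.take_append_drop]
      simp

-- ===== VERDICT (by name: the statement is the Claim_ definition above) =====
theorem count_number_help_spec : Claim_equal_count_number_help := by
  intro A _ hpre
  unfold Spec_count_number_help
  exact main_eq A.length A rfl hpre

theorem count_number_help_raises : Claim_raises_count_number_help := by
  unfold Claim_raises_count_number_help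
  exact ⟨fun A _ hr hp => hp hr, by decide⟩

-- self-check: B's port really returns the stated value on the raise witness (uses count_number_help_raises)
theorem pvRaiseWitness_ok :
    count_number_help_alt pvRaiseWitness_count_number_help = pvRaiseWitnessOut_count_number_help :=
  count_number_help_raises.2.2.2
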